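-- pv_equiv track=rewrite | github.com/TechKuro/Gantt_App | main.py | _get_aggregate_status
-- ===== SOURCE A (Python) =====
-- def _get_aggregate_status(task):
--     sub_statuses = [s['status'] for s in task.get('sub_tasks', [])]
--     if not sub_statuses:
--         return "Not Started"
--
--     if all(s == "Completed" for s in sub_statuses):
--         return "Completed"
--     if all(s == "Not Started" for s in sub_statuses):
--         return "Not Started"
--     return "In Progress"
-- ===== SOURCE B (Python) =====
-- def _get_aggregate_status(task):
--     # Reduce over a 3-element join-semilattice: each status is normalized to one of
--     # "Completed" / "Not Started" / "In Progress"; join(x, y) = x if x == y else "In Progress".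
--     # Folding the join over the normalized statuses gives the aggregate; empty => "Not Started".
--     agg = None
--     for s in task.get('sub_tasks', []):
--         st = s['status']
--         if st != "Completed" and st != "Not Started":
--             st = "In Progress"
--         if agg is None:
--             agg = st
--         elif agg != st:
--             return "In Progress"   # join hit top: short-circuit
--     return agg if agg is not None else "Not Started"
-- ===== Notes on version B (the rewrite author's own statement) =====
-- stated objective: alternative
-- what changed: Instead of building a status list and scanning it twice with all(), B normalizes each status into a 3-element join-semilattice and folds a pairwise join (equal stays, unequal jumps to 'In Progress') with a short-circuit exit; correct because the aggregate is exactly the semilattice join of the normalized statuses.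
import Mathlib
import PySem

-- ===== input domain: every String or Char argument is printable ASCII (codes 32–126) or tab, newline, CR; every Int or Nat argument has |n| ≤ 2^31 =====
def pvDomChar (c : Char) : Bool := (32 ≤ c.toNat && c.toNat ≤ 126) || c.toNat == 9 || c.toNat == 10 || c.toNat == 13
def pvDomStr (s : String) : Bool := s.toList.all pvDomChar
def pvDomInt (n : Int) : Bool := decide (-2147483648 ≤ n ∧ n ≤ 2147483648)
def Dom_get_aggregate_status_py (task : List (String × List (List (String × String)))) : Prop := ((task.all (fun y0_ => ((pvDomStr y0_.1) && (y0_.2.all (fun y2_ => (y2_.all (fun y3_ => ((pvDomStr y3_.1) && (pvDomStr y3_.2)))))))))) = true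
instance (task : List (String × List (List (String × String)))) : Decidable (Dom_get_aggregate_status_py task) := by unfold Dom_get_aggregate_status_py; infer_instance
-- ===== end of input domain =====

-- B folds a semilattice join over normalized statuses (with early exit) instead of A's list-building plus two all() scans; return value only, no speed claim.

-- ===== PORT A =====
-- dict lookup (first match) on an association list
def pvLookup (d : List (String × String)) (k : String) : Option String :=
  (d.find? (fun p => p.1 == k)).map (·.2)

-- task.get('sub_tasks', [])
def pvSubTasks (task : List (String × List (List (String × String)))) : List (List (String × String)) :=
  ((task.find? (fun p => p.1 == "sub_tasks")).map (·.2)).getD []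

def get_aggregate_status_py (task : List (String × List (List (String × String)))) : String :=
  -- s['status'] raises KeyError when absent; Pre_ excludes that, the port defaults to ""
  let sub_statuses := (pvSubTasks task).map (fun s => (pvLookup s "status").getD "")
  if sub_statuses.isEmpty then "Not Started"
  else if sub_statuses.all (fun s => s == "Completed") then "Completed"
  else if sub_statuses.all (fun s => s == "Not Started") then "Not Started"
  else "In Progress"

-- ===== PORT B =====
-- normalization of one sub-task's status into the 3-element semilattice
def pvNorm (s : List (String × String)) : String :=
  let st := (pvLookup s "status").getD ""
  if st != "Completed" && st != "Not Started" then "In Progress" else st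

-- Source B's loop: accumulator agg : Option String, early return on a join that hits "In Progress"
def pvAggLoop : Option String → List (List (String × String)) → String
  | none, [] => "Not Started"
  | some a, [] => a
  | none, s :: rest => pvAggLoop (some (pvNorm s)) rest
  | some a, s :: rest => if a != pvNorm s then "In Progress" else pvAggLoop (some a) rest

def get_aggregate_status_py_alt (task : List (String × List (List (String × String)))) : String :=
  pvAggLoop none (pvSubTasks task)

-- ===== PRECONDITION & SPEC =====
-- Pre_ excludes exactly the inputs where Python raises KeyError: some sub-task dict has no 'status' key (both A and B raise there).
def Pre_get_aggregate_status_py (task : List (String × List (List (String × String)))) : Prop :=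
  ∀ s ∈ pvSubTasks task, (s.find? (fun p => p.1 == "status")).isSome
instance (task : List (String × List (List (String × String)))) : Decidable (Pre_get_aggregate_status_py task) := by unfold Pre_get_aggregate_status_py; infer_instance

def pvWitness_get_aggregate_status_py : (List (String × List (List (String × String)))) :=
  [("sub_tasks", [[("status", "Completed")], [("status", "In Progress")]])]

def Spec_get_aggregate_status_py (task : List (String × List (List (String × String)))) (out : String) : Prop := out = get_aggregate_status_py_alt task
instance (task : List (String × List (List (String × String)))) (out : String) : Decidable (Spec_get_aggregate_status_py task out) := by unfold Spec_get_aggregate_status_py; infer_instance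

-- ===== CLAIM (what is proved, stated in full; the proofs are below) =====
def Claim_equal_get_aggregate_status_py : Prop := ∀ (task : List (String × List (List (String × String)))), Dom_get_aggregate_status_py task → Pre_get_aggregate_status_py task → Spec_get_aggregate_status_py task (get_aggregate_status_py task)

-- ===== LEMMAS AND PROOFS =====
-- raw status of one sub-task dict
def pvRaw (s : List (String × String)) : String := (pvLookup s "status").getD ""

theorem pvNorm_eq_completed (s : List (String × String)) :
    (pvNorm s == "Completed") = (pvRaw s == "Completed") := by
  unfold pvNorm pvRaw
  by_cases h : (pvLookup s "status").getD "" = "Completed" <;> simp [h] <;>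
    split_ifs with h2 <;> simp_all

theorem pvNorm_eq_ns (s : List (String × String)) :
    (pvNorm s == "Not Started") = (pvRaw s == "Not Started") := by
  unfold pvNorm pvRaw
  by_cases h : (pvLookup s "status").getD "" = "Not Started" <;> simp [h] <;>
    split_ifs with h2 <;> simp_all

-- characterization of the loop once the accumulator is set
theorem pvAggLoop_some (rest : List (List (String × String))) (a : String) :
    pvAggLoop (some a) rest =
      if rest.all (fun s => pvNorm s == a) then a else "In Progress" := by
  induction rest with
  | nil => simp [pvAggLoop]
  | cons x xs ih =>
    simp only [pvAggLoop, List.all_cons]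
    by_cases hx : pvNorm x = a
    · simp [hx, ih]
    · have : (a != pvNorm x) = true := by simp [bne, Ne.symm hx]
      simp [this, hx, fun h => (hx (by simpa using h))]

-- pointwise: normalization preserves being "Completed" / "Not Started"
theorem pvNorm_completed_iff (s : List (String × String)) :
    pvNorm s = "Completed" ↔ pvRaw s = "Completed" := by
  have h := pvNorm_eq_completed s
  constructor <;> intro hx <;> simp [hx] at h ⊢ <;> simpa using h

theorem pvNorm_ns_iff (s : List (String × String)) :
    pvNorm s = "Not Started" ↔ pvRaw s = "Not Started" := by
  have h := pvNorm_eq_ns s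
  constructor <;> intro hx <;> simp [hx] at h ⊢ <;> simpa using h

-- ===== VERDICT (by name: the statement is the Claim_ definition above) =====
theorem get_aggregate_status_py_spec : Claim_equal_get_aggregate_status_py := by
  intro task _ _
  unfold Spec_get_aggregate_status_py get_aggregate_status_py get_aggregate_status_py_alt
  cases hsubs : pvSubTasks task with
  | nil => simp [pvAggLoop]
  | cons x xs =>
    simp only [List.map_cons, List.isEmpty_cons, List.all_cons, pvAggLoop, pvAggLoop_some,
      Bool.false_eq_true, if_false]
    by_cases hC : (pvLookup x "status").getD "" = "Completed"
    · have hnx : pvNorm x = "Completed" := (pvNorm_completed_iff x).2 hC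
      simp [hnx, hC, List.all_map, Function.comp_def, pvNorm_eq_completed, pvRaw]
    · by_cases hN : (pvLookup x "status").getD "" = "Not Started"
      · have hnx : pvNorm x = "Not Started" := (pvNorm_ns_iff x).2 hN
        simp [hnx, hN, hC, List.all_map, Function.comp_def, pvNorm_eq_ns, pvRaw]
      · -- head is neither: A returns "In Progress", and B's join is forced to "In Progress"
        have hnx : pvNorm x = "In Progress" := by
          unfold pvNorm
          have h1 : ((pvLookup x "status").getD "" != "Completed") = true := by simpa [bne] using hC
          have h2 : ((pvLookup x "status").getD "" != "Not Started") = true := by simpa [bne] using hN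
          simp [h1, h2]
        simp only [hnx]
        simp [hC, hN]
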